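-- pv_equiv track=rewrite | github.com/lawrence-ms/Codewars | dubstep.py | song_decoder
-- ===== SOURCE A (Python) =====
-- def song_decoder(song):
--     wub_check = False
--     new_song = ""
--     pos = 0
--     while pos < len(song):
--         if song[pos:pos+3] == "WUB":
--             pos = pos + 2
--             wub_check = True
--         else:
--             if wub_check:
--                 new_song += " " + song[pos]
--                 wub_check = False
--             else:
--                 new_song += song[pos]
--         pos += 1
--     return new_song.lstrip()
-- ===== SOURCE B (Python) =====
-- def song_decoder(song):
--     return ' '.join(s for s in song.split('WUB') if s)
-- ===== Notes on version B (the rewrite author's own statement) =====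
-- stated objective: faster
-- what changed: Replaced the stateful character-by-character scan (wub_check flag, per-position 3-char slice, string += accumulation) by a one-line tokenize-then-join: split on 'WUB', drop empty segments, join with single spaces.
-- intended difference: On inputs whose first character after any leading 'WUB's is literal whitespace, A's final lstrip() also deletes that real whitespace (e.g. ' A' -> 'A') while B preserves it (' A'), which is intended since only 'WUB' is the noise to be removed. — e.g. on song_decoder(" A"): A returns "A", B returns " A"
import Mathlib
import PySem

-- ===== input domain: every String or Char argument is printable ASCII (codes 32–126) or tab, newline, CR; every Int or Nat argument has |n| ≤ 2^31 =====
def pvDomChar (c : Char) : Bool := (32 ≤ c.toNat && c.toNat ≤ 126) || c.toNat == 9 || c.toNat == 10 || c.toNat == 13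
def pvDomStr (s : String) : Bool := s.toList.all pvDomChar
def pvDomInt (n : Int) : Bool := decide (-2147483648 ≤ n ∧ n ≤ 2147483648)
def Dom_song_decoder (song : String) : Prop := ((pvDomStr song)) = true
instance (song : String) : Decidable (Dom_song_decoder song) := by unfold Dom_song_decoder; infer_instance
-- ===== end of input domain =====

-- B replaces A's stateful flag-scan by split-on-'WUB' / drop-empties / join-with-spaces; on inputs whose
-- first character after leading 'WUB's is real whitespace A's final lstrip() deletes it and B keeps it (see D_).

-- ===== PORT A =====
-- A's while loop; the remaining suffix plays the role of pos, the test song[pos:pos+3] == "WUB" is the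
-- 'W'::'U'::'B':: pattern, and a match advances pos by 3 (pos = pos + 2 then pos += 1).
def songLoopA : List Char → Bool → List Char → List Char
  | [], _, acc => acc
  | 'W' :: 'U' :: 'B' :: rest, _, acc => songLoopA rest true acc            -- wub_check = True
  | c :: rest, wub, acc =>
    if wub then songLoopA rest false (acc ++ [' ', c])                      -- new_song += " " + song[pos]
    else songLoopA rest wub (acc ++ [c])                                    -- new_song += song[pos]

def song_decoder (song : String) : String :=
  String.ofList (PySem.Chars.lstrip (songLoopA song.toList false []))

-- ===== PORT B =====
-- Source B: ' '.join(s for s in song.split('WUB') if s)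
def song_decoder_alt (song : String) : String :=
  String.ofList (PySem.Chars.join " ".toList
    ((PySem.Chars.splitOn song.toList "WUB".toList).filter (fun s => s ≠ [])))

-- ===== PRECONDITION & SPEC =====
-- length of the longest common prefix of l with the periodic pattern 'WUBWUBWUB…' (state j = position mod 3)
def wubChar (j : Nat) : Char := if j = 0 then 'W' else if j = 1 then 'U' else 'B'

def lcpWUB : List Char → Nat → Nat
  | [], _ => 0
  | c :: rest, j => if c = wubChar j then 1 + lcpWUB rest ((j + 1) % 3) else 0

-- On inputs whose first character after any leading 'WUB's is literal whitespace, A's final lstrip() also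
-- deletes that real whitespace (e.g. ' A' -> 'A') while B preserves it (' A'); B's value is the intended
-- one since only 'WUB' is the noise to be removed.  (Closed form: the input deviates from the periodic
-- pattern 'WUBWUB…' first at a block boundary, with a whitespace character there.)
def D_song_decoder (song : String) : Prop :=
  (lcpWUB song.toList 0) % 3 = 0 ∧
    ((song.toList.drop (lcpWUB song.toList 0)).head?.any PySem.Chars.isspace) = true

instance (song : String) : Decidable (D_song_decoder song) := by
  unfold D_song_decoder; infer_instance

def Spec_song_decoder (song : String) (out : String) : Prop :=
  ¬ D_song_decoder song → out = song_decoder_alt song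

instance (song : String) (out : String) : Decidable (Spec_song_decoder song out) := by
  unfold Spec_song_decoder; infer_instance

def pvDiffWitness_song_decoder : String := " A"
def pvDiffWitnessOut_song_decoder : String × String := ("A", " A")

-- ===== CLAIM (what is proved, stated in full; the proofs are below) =====
def Claim_unchanged_song_decoder : Prop := ∀ (song : String), Dom_song_decoder song → Spec_song_decoder song (song_decoder song)
def Claim_changed_song_decoder : Prop := Dom_song_decoder (pvDiffWitness_song_decoder) ∧ D_song_decoder (pvDiffWitness_song_decoder) ∧ song_decoder (pvDiffWitness_song_decoder) = pvDiffWitnessOut_song_decoder.1 ∧ song_decoder_alt (pvDiffWitness_song_decoder) = pvDiffWitnessOut_song_decoder.2 ∧ pvDiffWitnessOut_song_decoder.1 ≠ pvDiffWitnessOut_song_decoder.2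
def Claim_exact_song_decoder : Prop := ∀ (song : String), Dom_song_decoder song → D_song_decoder song → song_decoder song ≠ song_decoder_alt song

-- ===== LEMMAS AND PROOFS =====

-- proof-side reference split: the WUB-free segments of l, in order
def splitW : List Char → List (List Char)
  | [] => [[]]
  | 'W' :: 'U' :: 'B' :: rest => [] :: splitW rest
  | c :: rest =>
    match splitW rest with
    | [] => [[c]]
    | h :: t => (c :: h) :: t

def joinW (S : List (List Char)) : List Char :=
  PySem.Chars.join [' '] (S.filter (fun s => s ≠ []))

def matchWUB : List Char → Bool
  | 'W' :: 'U' :: 'B' :: _ => true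
  | _ => false

-- proof-side: the input with its maximal leading run of 'WUB's removed
def dropWUBs : List Char → List Char
  | 'W' :: 'U' :: 'B' :: rest => dropWUBs rest
  | l => l

theorem dropWUBs_eq_self (t : List Char)
    (h : ∀ tail, t = 'W' :: 'U' :: 'B' :: tail → False) : dropWUBs t = t := by
  rw [dropWUBs.eq_def]
  split
  · rename_i x r; exact (h r rfl).elim
  · rfl

theorem Dform_iff (l : List Char) :
    ((lcpWUB l 0) % 3 = 0 ∧ ((l.drop (lcpWUB l 0)).head?.any PySem.Chars.isspace) = true)
      ↔ ((dropWUBs l).head?.any PySem.Chars.isspace) = true := by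
  induction l using dropWUBs.induct with
  | case1 rest ih =>
    have hm : lcpWUB ('W' :: 'U' :: 'B' :: rest) 0 = 3 + lcpWUB rest 0 := by
      simp [lcpWUB, wubChar]
      omega
    rw [dropWUBs, ← ih, hm]
    have hmod : (3 + lcpWUB rest 0) % 3 = lcpWUB rest 0 % 3 := by omega
    have hdrop : ('W' :: 'U' :: 'B' :: rest).drop (3 + lcpWUB rest 0) = rest.drop (lcpWUB rest 0) := by
      have : 3 + lcpWUB rest 0 = lcpWUB rest 0 + 1 + 1 + 1 := by omega
      rw [this]
      simp [List.drop_succ_cons]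
    rw [hmod, hdrop]
  | case2 t h =>
    rw [dropWUBs_eq_self t h]
    rcases t with _ | ⟨c, r⟩
    · simp [lcpWUB]
    by_cases hcW : c = 'W'
    · subst hcW
      have hne : ∀ r2, r = 'U' :: 'B' :: r2 → False := fun r2 hr => h r2 (by rw [hr])
      have hws : PySem.Chars.isspace 'W' = false := by decide
      have hm12 : lcpWUB ('W' :: r) 0 = 1 ∨ lcpWUB ('W' :: r) 0 = 2 := by
        rcases r with _ | ⟨d, r2⟩
        · left; simp [lcpWUB, wubChar]
        by_cases hdU : d = 'U'
        · subst hdU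
          rcases r2 with _ | ⟨e, r3⟩
          · right; simp [lcpWUB, wubChar]
          by_cases heB : e = 'B'
          · subst heB; exact (hne r3 rfl).elim
          · right; simp [lcpWUB, wubChar, heB]
        · left; simp [lcpWUB, wubChar, hdU]
      constructor
      · rintro ⟨h1, _⟩
        rcases hm12 with hm | hm <;> rw [hm] at h1 <;> omega
      · intro hc
        simp [hws] at hc
    · have hm0 : lcpWUB (c :: r) 0 = 0 := by simp [lcpWUB, wubChar, hcW]
      rw [hm0]
      simp

theorem songLoopA_cons_ne (c : Char) (rest : List Char) (w : Bool) (acc : List Char)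
    (h : ∀ r, c = 'W' → rest = 'U' :: 'B' :: r → False) :
    songLoopA (c :: rest) w acc
      = if w then songLoopA rest false (acc ++ [' ', c]) else songLoopA rest w (acc ++ [c]) := by
  rw [songLoopA.eq_def]
  split
  · simp_all
  · rename_i r heq; injection heq with h1 h2; exact absurd h2 (fun h2 => h _ h1 h2)
  · rename_i heq; injection heq with h1 h2; subst h1; subst h2; rfl

theorem splitW_cons_ne (c : Char) (rest : List Char)
    (h : ∀ r, c = 'W' → rest = 'U' :: 'B' :: r → False) :
    splitW (c :: rest)
      = match splitW rest with
        | [] => [[c]]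
        | h :: t => (c :: h) :: t := by
  rw [splitW.eq_def]
  split
  · simp_all
  · rename_i r heq; injection heq with h1 h2; exact absurd h2 (fun h2 => h _ h1 h2)
  · rename_i heq; injection heq with h1 h2; subst h1; subst h2; rfl

theorem intercalate_cons (sep a : List Char) (F : List (List Char)) :
    List.intercalate sep (a :: F) = a ++ (if F = [] then [] else sep ++ List.intercalate sep F) := by
  cases F with
  | nil => simp [List.intercalate]
  | cons b t => simp [List.intercalate, List.intersperse]

theorem songLoopA_acc (l : List Char) : ∀ (w : Bool) (acc : List Char),
    songLoopA l w acc = acc ++ songLoopA l w [] := by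
  induction l using splitW.induct with
  | case1 => intro w acc; simp [songLoopA]
  | case2 rest ih => intro w acc; simp only [songLoopA]; exact ih _ _
  | case3 c rest h _ ih | case4 c rest h _ _ _ ih =>
    intro w acc
    rw [songLoopA_cons_ne _ _ _ _ h, songLoopA_cons_ne _ _ _ _ h]
    cases w <;> simp only [if_true, Bool.false_eq_true, if_false, List.nil_append]
    · rw [ih false [c], ih false (acc ++ [c])]; simp
    · rw [ih false [' ', c], ih false (acc ++ [' ', c])]; simp

theorem songLoopA_true (c : Char) (rest : List Char)
    (h : ∀ r, c = 'W' → rest = 'U' :: 'B' :: r → False) :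
    songLoopA (c :: rest) true [] = ' ' :: songLoopA (c :: rest) false [] := by
  rw [songLoopA_cons_ne _ _ _ _ h, songLoopA_cons_ne _ _ _ _ h]
  simp only [if_true, Bool.false_eq_true, if_false, List.nil_append]
  rw [songLoopA_acc rest false [' ', c], songLoopA_acc rest false [c]]
  rfl

theorem joinW_cons_ne (a : List Char) (S : List (List Char)) (ha : a ≠ []) :
    joinW (a :: S) = a ++ (if (S.filter (fun s => s ≠ [])) = [] then [] else ' ' :: joinW S) := by
  unfold joinW PySem.Chars.join
  simp only [List.filter_cons, ha, ne_eq, decide_not, decide_false, Bool.not_false, if_true]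
  rw [intercalate_cons]
  rfl

theorem joinW_eq_nil_iff (S : List (List Char)) :
    joinW S = [] ↔ S.filter (fun s => s ≠ []) = [] := by
  unfold joinW PySem.Chars.join
  rcases hF : S.filter (fun s => s ≠ []) with _ | ⟨a, t⟩
  · simp [List.intercalate]
  · have ha : a ≠ [] := by
      have : a ∈ S.filter (fun s => s ≠ []) := by rw [hF]; exact List.mem_cons_self
      simpa using (List.of_mem_filter this)
    rw [intercalate_cons]
    simp [ha]

theorem matchWUB_cons_false {c : Char} {rest : List Char} (h : matchWUB (c :: rest) = false) :
    ∀ r, c = 'W' → rest = 'U' :: 'B' :: r → False := by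
  intro r h1 h2; subst h1; subst h2; simp [matchWUB] at h

theorem joinW_cons_nil (S : List (List Char)) : joinW ([] :: S) = joinW S := by
  simp [joinW]

theorem splitW_head (c : Char) (rest : List Char)
    (h : ∀ r, c = 'W' → rest = 'U' :: 'B' :: r → False) :
    ∃ h' t', splitW (c :: rest) = (c :: h') :: t' := by
  rw [splitW_cons_ne _ _ h]
  rcases hs : splitW rest with _ | ⟨a, t⟩
  · exact ⟨[], [], rfl⟩
  · exact ⟨a, t, rfl⟩

theorem matchWUB_true_elim {l : List Char} (h : matchWUB l = true) :
    ∃ r, l = 'W' :: 'U' :: 'B' :: r := by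
  rw [matchWUB.eq_def] at h
  split at h
  · rename_i x r; exact ⟨r, rfl⟩
  · exact absurd h (by simp)

-- main invariant: A's scan result vs B's join, the leading-WUB space made explicit
theorem main_inv : ∀ (n : Nat) (l : List Char), l.length ≤ n →
    (songLoopA l false [] =
      if matchWUB l then
        (if joinW (splitW l) = [] then [] else ' ' :: joinW (splitW l))
      else joinW (splitW l)) ∧
    (∀ c rest, l = c :: rest → matchWUB l = false →
      joinW (splitW l) = c :: songLoopA rest false []) := by
  intro n
  induction n with
  | zero =>
    intro l hl
    have : l = [] := List.length_eq_zero_iff.mp (Nat.le_zero.mp hl)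
    subst this
    exact ⟨by simp [songLoopA, matchWUB, joinW, splitW], by intro c rest h; simp at h⟩
  | succ n ih =>
    intro l hl
    rcases l with _ | ⟨c, rest⟩
    · exact ⟨by simp [songLoopA, matchWUB, joinW, splitW], by intro c rest h; simp at h⟩
    by_cases hw : matchWUB (c :: rest) = true
    · -- l starts with WUB
      obtain ⟨r, hr⟩ := matchWUB_true_elim hw
      injection hr with h1 h2; subst h1; subst h2
      refine ⟨?_, by intro c' r' h' hm; rw [hw] at hm; exact absurd hm (by simp)⟩
      have hrlen : r.length ≤ n := by simp at hl; omega
      simp only [hw, if_true]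
      simp only [songLoopA, splitW, joinW_cons_nil]
      rcases r with _ | ⟨d, r2⟩
      · simp [songLoopA, joinW, splitW]
      by_cases hw2 : matchWUB (d :: r2) = true
      · obtain ⟨r3, hr3⟩ := matchWUB_true_elim hw2
        injection hr3 with g1 g2; subst g1; subst g2
        have h1 := (ih _ hrlen).1
        rw [hw2, if_pos rfl] at h1
        simpa only [songLoopA, splitW, joinW_cons_nil] using h1
      · have hne2 := matchWUB_cons_false (by simpa using hw2)
        rw [songLoopA_true _ _ hne2]
        have h1 := (ih _ hrlen).1
        rw [Bool.not_eq_true] at hw2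
        rw [hw2] at h1; simp only [Bool.false_eq_true, if_false] at h1
        rw [h1]
        have h2 := (ih _ hrlen).2 d r2 rfl (by simpa using hw2)
        rw [h2]
        simp
    · -- l = c :: rest, not starting with WUB
      have hne := matchWUB_cons_false (by simpa using hw)
      have hrlen : rest.length ≤ n := by simp at hl; omega
      have hC2 : joinW (splitW (c :: rest)) = c :: songLoopA rest false [] := by
        rcases rest with _ | ⟨d, r2⟩
        · simp [splitW_cons_ne _ _ hne, splitW, joinW, songLoopA]
        by_cases hw2 : matchWUB (d :: r2) = true
        · obtain ⟨r3, hr3⟩ := matchWUB_true_elim hw2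
          injection hr3 with g1 g2; subst g1; subst g2
          rw [splitW_cons_ne _ _ hne]
          simp only [splitW]
          rw [joinW_cons_ne _ _ (by simp)]
          have h1 := (ih _ hrlen).1
          rw [hw2, if_pos rfl] at h1
          simp only [songLoopA] at h1 ⊢
          rw [h1]
          simp only [splitW, joinW_cons_nil, joinW_eq_nil_iff, List.singleton_append]
        · have hne2 := matchWUB_cons_false (by simpa using hw2)
          obtain ⟨h', t', hsp⟩ := splitW_head d r2 hne2
          rw [splitW_cons_ne _ _ hne, hsp]
          rw [joinW_cons_ne _ _ (by simp)]
          have h2 := (ih _ hrlen).2 d r2 rfl (by simpa using hw2)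
          rw [hsp, joinW_cons_ne _ _ (by simp)] at h2
          rw [songLoopA_cons_ne _ _ _ _ hne2]
          simp only [Bool.false_eq_true, if_false, List.nil_append]
          rw [songLoopA_acc r2 false [d]]
          simp only [List.cons_append, List.nil_append] at h2 ⊢
          rw [← h2]
      refine ⟨?_, by intro c' r' h' _; injection h' with e1 e2; subst e1; subst e2; exact hC2⟩
      rw [Bool.not_eq_true] at hw
      rw [hw]
      simp only [Bool.false_eq_true, if_false]
      rw [hC2, songLoopA_cons_ne _ _ _ _ hne]
      simp only [Bool.false_eq_true, if_false, List.nil_append]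
      rw [songLoopA_acc rest false [c]]
      rfl

theorem splitW_ne_nil (l : List Char) : splitW l ≠ [] := by
  unfold splitW
  split
  · simp
  · simp
  · split <;> simp

theorem isPrefixOf_wub (l : List Char) :
    (['W', 'U', 'B'] : List Char).isPrefixOf l = matchWUB l := by
  rcases hm : matchWUB l with _ | _
  · rw [Bool.eq_false_iff]
    intro hpre
    obtain ⟨t, ht⟩ := List.isPrefixOf_iff_prefix.mp hpre
    subst ht
    simp [matchWUB] at hm
  · obtain ⟨r, hr⟩ := matchWUB_true_elim hm
    subst hr
    simp [List.isPrefixOf]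

theorem splitOn_go_eq : ∀ (fuel : Nat) (l cur : List Char) (acc : List (List Char)),
    l.length < fuel →
    PySem.Chars.splitOn.go ['W', 'U', 'B'] fuel l cur acc
      = acc.reverse ++ (splitW l).modifyHead (fun s => cur.reverse ++ s) := by
  intro fuel
  induction fuel with
  | zero => intro l cur acc h; omega
  | succ n ih =>
    intro l cur acc h
    rw [PySem.Chars.splitOn.go.eq_def]
    rcases l with _ | ⟨c, rest⟩
    · simp [splitW]
    simp only [isPrefixOf_wub]
    rcases hm : matchWUB (c :: rest) with _ | _
    · simp only [Bool.false_eq_true, if_false]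
      have hne := matchWUB_cons_false hm
      rw [ih rest (c :: cur) acc (by simp at h ⊢; omega)]
      rw [splitW_cons_ne _ _ hne]
      rcases hs : splitW rest with _ | ⟨a, t⟩
      · exact absurd hs (splitW_ne_nil rest)
      · simp
    · simp only [if_true]
      obtain ⟨r, hr⟩ := matchWUB_true_elim hm
      injection hr with e1 e2; subst e1; subst e2
      have hdrop : List.drop (['W', 'U', 'B'] : List Char).length ('W' :: 'U' :: 'B' :: r) = r := rfl
      rw [hdrop, ih r [] (cur.reverse :: acc) (by simp at h ⊢; omega)]
      simp only [splitW, List.modifyHead, List.reverse_cons,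
        List.append_assoc]
      simp
      cases splitW r <;> rfl

theorem splitOn_eq (l : List Char) :
    PySem.Chars.splitOn l ['W', 'U', 'B'] = splitW l := by
  unfold PySem.Chars.splitOn
  rw [splitOn_go_eq (l.length + 1) l [] [] (by omega)]
  cases hs : splitW l <;> simp

theorem B0_dropWUBs (l : List Char) : joinW (splitW l) = joinW (splitW (dropWUBs l)) := by
  induction l using dropWUBs.induct with
  | case1 rest ih =>
    rw [dropWUBs]
    simp only [splitW, joinW_cons_nil]
    exact ih
  | case2 t h => rw [dropWUBs_eq_self t h]

theorem dropWUBs_not_wub (l : List Char) : ∀ r, dropWUBs l ≠ 'W' :: 'U' :: 'B' :: r := by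
  induction l using dropWUBs.induct with
  | case1 rest ih => rw [dropWUBs]; exact ih
  | case2 t h => rw [dropWUBs_eq_self t h]; intro r hr; exact h r hr

theorem dropWhile_head (p : Char → Bool) (Y : List Char) (c : Char) (X : List Char)
    (h : Y.dropWhile p = c :: X) : p c = false := by
  induction Y with
  | nil => simp at h
  | cons d rest ih =>
    by_cases hd : p d <;> simp [List.dropWhile, hd] at h
    · exact ih h
    · obtain ⟨h1, _⟩ := h; subst h1; simpa using hd

theorem matchWUB_eq_false (c : Char) (rest : List Char)
    (h : ∀ r, c = 'W' → rest = 'U' :: 'B' :: r → False) : matchWUB (c :: rest) = false := by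
  rw [matchWUB.eq_def]
  split
  · rename_i heq; injection heq with h1 h2; exact absurd h2 (fun h2 => h _ h1 h2)
  · rfl

theorem alt_eq (song : String) :
    song_decoder_alt song = String.ofList (joinW (splitW song.toList)) := by
  unfold song_decoder_alt joinW
  have hW : ("WUB".toList : List Char) = ['W', 'U', 'B'] := rfl
  have hS : (" ".toList : List Char) = [' '] := rfl
  rw [hW, hS, splitOn_eq]

-- A's value is B's value with at most one leading space, removed together with nothing else
-- by lstrip when the first real character is not whitespace
theorem lstrip_eq_joinW (l : List Char)
    (hD : ((dropWUBs l).head?.any PySem.Chars.isspace) = false) :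
    PySem.Chars.lstrip (songLoopA l false []) = joinW (splitW l) := by
  have hmain := (main_inv l.length l le_rfl).1
  rcases hd : dropWUBs l with _ | ⟨c, r⟩
  · have hB : joinW (splitW l) = [] := by
      rw [B0_dropWUBs, hd]
      simp [splitW, joinW]
    rw [hB] at hmain ⊢
    rw [hmain]
    split <;> simp [PySem.Chars.lstrip]
  · have hne : ∀ r', c = 'W' → r = 'U' :: 'B' :: r' → False := by
      intro r' e1 e2
      exact dropWUBs_not_wub l r' (by rw [hd, e1, e2])
    have hC2 := (main_inv (dropWUBs l).length (dropWUBs l) le_rfl).2 c r hd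
        (by rw [hd]; exact matchWUB_eq_false c r hne)
    have hB : joinW (splitW l) = c :: songLoopA r false [] := (B0_dropWUBs l).trans hC2
    have hc : PySem.Chars.isspace c = false := by
      rw [hd] at hD; simpa using hD
    rw [hB] at hmain ⊢
    rw [hmain]
    have hsp : PySem.Chars.isspace ' ' = true := by decide
    rcases hmw : matchWUB l with _ | _
    · simp only [Bool.false_eq_true, if_false]
      unfold PySem.Chars.lstrip
      simp [List.dropWhile, hc]
    · simp only [if_true, if_neg (by simp : (c :: songLoopA r false [] : List Char) ≠ [])]
      unfold PySem.Chars.lstrip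
      simp [List.dropWhile, hsp, hc]

theorem ofList_inj {a b : List Char} (h : String.ofList a = String.ofList b) : a = b := by
  have := congrArg String.toList h
  simpa using this

-- ===== VERDICT (by name: the statement is the Claim_ definition above) =====
theorem song_decoder_spec : Claim_unchanged_song_decoder := by
  unfold Claim_unchanged_song_decoder
  intro song _ hD
  unfold song_decoder
  rw [alt_eq, lstrip_eq_joinW]
  have hx := (not_iff_not.mpr (Dform_iff song.toList)).mp hD
  simpa using hx

theorem song_decoder_changed : Claim_changed_song_decoder := by
  unfold Claim_changed_song_decoder; decide

theorem song_decoder_tight : Claim_exact_song_decoder := by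
  unfold Claim_exact_song_decoder
  intro song _ hD heq
  have hD' : ((dropWUBs song.toList).head?.any PySem.Chars.isspace) = true :=
    (Dform_iff song.toList).mp hD
  rcases hd : dropWUBs song.toList with _ | ⟨c, r⟩
  · rw [hd] at hD'; simp at hD'
  have hc : PySem.Chars.isspace c = true := by rw [hd] at hD'; simpa using hD'
  have hne : ∀ r', c = 'W' → r = 'U' :: 'B' :: r' → False := by
    intro r' e1 e2
    exact dropWUBs_not_wub song.toList r' (by rw [hd, e1, e2])
  have hC2 := (main_inv (dropWUBs song.toList).length (dropWUBs song.toList) le_rfl).2 c r hd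
      (by rw [hd]; exact matchWUB_eq_false c r hne)
  have hB : joinW (splitW song.toList) = c :: songLoopA r false [] :=
    (B0_dropWUBs song.toList).trans hC2
  rw [alt_eq, hB] at heq
  unfold song_decoder PySem.Chars.lstrip at heq
  have := ofList_inj heq
  have hfalse := dropWhile_head _ _ _ _ this
  rw [hc] at hfalse
  exact absurd hfalse (by simp)
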